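-- pv_equiv track=rewrite | github.com/loverisdust/numberTransfer | test.py | lowertoupper
-- ===== SOURCE A (Python) =====
-- def lowertoupper(number, recursive_depth=0):
--     str_number = str(number)
--     if len(str_number) > 4:
--         str_number = str_number[-4:]
--     bits = "零 壹 贰 叁 肆 伍 陆 柒 捌 玖".split(" ")
--
--     units = " 拾 佰 仟".split(" ")
--     large_unit = ' 万 亿 万'.split(" ")  # 可扩展,以万为单位
--     number_len = len(str_number)
--     result = ""
--
--     for i in range(number_len):
--         result += bits[int(str_number[i])]
--         if str_number[i] != "0":
--             result += units[number_len - i - 1]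
--
--     # 去除连续的零
--     while "零零" in result:
--         result = result.replace("零零", "零")
--     # 去除尾部的零
--     if result[-1] == "零":
--         result = result[:-1]
--     # 调整10~20之间的数
--     if result[:2] == "一十":
--         result = result[1:]
--     # 字符串连接上大单位
--     result += large_unit[recursive_depth]
--
--     # 判断是否递归
--     if len(str(number)) > 4:
--         recursive_depth += 1
--         return lowertoupper(str(number)[:-4], recursive_depth) + result
--     else:
--         return result
-- ===== SOURCE B (Python) =====
-- def lowertoupper(number, recursive_depth=0):
--     bits = "零壹贰叁肆伍陆柒捌玖"
--     units = ["", "拾", "佰", "仟"]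
--     large_unit = ["", "万", "亿", "万"]
--     # split the decimal string into 4-digit groups from the right
--     s = str(number)
--     groups = []
--     while len(s) > 4:
--         groups.append(s[-4:])
--         s = s[:-4]
--     groups.append(s)
--     # format each group least- to most-significant, prepending results
--     out = ""
--     depth = recursive_depth
--     for g in groups:
--         chunk = ""
--         pending_zero = False
--         m = len(g)
--         for i in range(m):
--             d = int(g[i])
--             if d == 0:
--                 pending_zero = True
--             else:
--                 if pending_zero:
--                     chunk += "零"
--                     pending_zero = False
--                 chunk += bits[d] + units[m - 1 - i]
--         out = chunk + large_unit[depth] + out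
--         depth += 1
--     return out
-- ===== Notes on version B (the rewrite author's own statement) =====
-- stated objective: simpler
-- what changed: B replaces A's recursion-with-string-cleanup (build raw token string, repeatedly replace '零零', trim, dead '一十' fix) by an iterative loop over the 4-digit groups split from the right, formatting each group in a single pass with a pending-zero flag so no collapse/trim passes are needed.
-- outside the precondition, e.g. on lowertoupper(-5, 0): A raises ValueError, B raises ValueError; on lowertoupper(12345, 3): A raises IndexError, B raises IndexError
import Mathlib
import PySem

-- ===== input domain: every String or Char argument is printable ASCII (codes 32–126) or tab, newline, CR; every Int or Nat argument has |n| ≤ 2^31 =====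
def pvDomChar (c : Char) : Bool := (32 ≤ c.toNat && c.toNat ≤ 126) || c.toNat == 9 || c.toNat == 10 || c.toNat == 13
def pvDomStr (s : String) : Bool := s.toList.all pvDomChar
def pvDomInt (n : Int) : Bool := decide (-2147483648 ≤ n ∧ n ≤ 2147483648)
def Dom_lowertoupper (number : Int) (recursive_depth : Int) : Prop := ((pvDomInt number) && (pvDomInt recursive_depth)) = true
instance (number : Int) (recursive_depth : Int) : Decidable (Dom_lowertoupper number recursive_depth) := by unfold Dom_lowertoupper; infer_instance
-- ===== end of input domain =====

-- B re-groups the digits iteratively (4-digit groups from the right, formatted in one pass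
-- with a pending-zero flag) instead of A's recursion plus build-then-clean-up string passes;
-- objective: simpler, same cost.

-- ===== PORT A =====
-- "零 壹 贰 叁 肆 伍 陆 柒 捌 玖".split(" ")
def pvBits : List (List Char) := [['零'],['壹'],['贰'],['叁'],['肆'],['伍'],['陆'],['柒'],['捌'],['玖']]
-- " 拾 佰 仟".split(" ")
def pvUnits : List (List Char) := [[],['拾'],['佰'],['仟']]
-- ' 万 亿 万'.split(" ")
def pvLarge : List (List Char) := [[],['万'],['亿'],['万']]

-- while "零零" in result: result = result.replace("零零", "零")
-- (fuel = current length; each iteration that fires shortens the string, so the fuel suffices)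
def pvCollapse : Nat → List Char → List Char
  | 0, r => r
  | f+1, r =>
    if PySem.Chars.isIn ['零','零'] r then pvCollapse f (PySem.Chars.replace r ['零','零'] ['零']) else r

-- the per-call formatting block of A (loop, zero-collapse, trailing-zero trim, "一十" fix)
def chunkA (strN : List Char) : List Char :=
  let m : Int := PySem.List.len strN
  let result := (PySem.List.pyRange 0 m 1).foldl (fun res i =>
    let c := PySem.List.pyGetD strN i ' '
    let res := res ++ PySem.List.pyGetD pvBits ((PySem.Int.ofChars? [c]).getD 0) []
    if c ≠ '0' then res ++ PySem.List.pyGetD pvUnits (m - i - 1) [] else res) []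
  let result := pvCollapse result.length result
  let result := if PySem.List.pyGetD result (-1) ' ' = '零' then PySem.Chars.slice result none (some (-1)) else result
  let result := if PySem.Chars.slice result none (some 2) = ['一','十'] then PySem.Chars.slice result (some 1) none else result
  result

-- A's body on the digit string (the recursive call passes str(number)[:-4], and str() of a
-- string is itself, so the string is the real recursion argument)
def lowertoupperAux (s : List Char) (recursive_depth : Int) : List Char :=
  let strN := if PySem.List.len s > 4 then PySem.Chars.slice s (some (-4)) none else s
  let result := chunkA strN ++ PySem.List.pyGetD pvLarge recursive_depth []
  if h : PySem.List.len s > 4 then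
    lowertoupperAux (PySem.Chars.slice s none (some (-4))) (recursive_depth + 1) ++ result
  else result
termination_by s.length
decreasing_by
  simp only [PySem.Chars.slice_eq_listSlice]
  rw [PySem.List.slice_to_neg_ofNat s 4 (by omega)]
  simp only [List.length_take]
  simp only [PySem.List.len_eq] at h
  omega

def lowertoupper (number : Int) (recursive_depth : Int) : String :=
  String.ofList (lowertoupperAux (PySem.Int.toChars number) recursive_depth)

-- ===== PORT B =====
def pvBitsB : List Char := ['零','壹','贰','叁','肆','伍','陆','柒','捌','玖']

-- B's one-pass chunk formatter (pending-zero flag instead of build-then-clean)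
def chunkB (g : List Char) : List Char :=
  let m : Int := PySem.List.len g
  ((PySem.List.pyRange 0 m 1).foldl (fun (st : List Char × Bool) i =>
    let d := (PySem.Int.ofChars? [PySem.List.pyGetD g i ' ']).getD 0
    if d = 0 then (st.1, true)
    else (st.1 ++ ((if st.2 then ['零'] else []) ++ [PySem.List.pyGetD pvBitsB d ' ']
            ++ PySem.List.pyGetD pvUnits (m - i - 1) []), false))
    ([], false)).1

-- split the decimal string into 4-digit groups from the right (least-significant first)
def splitGroupsB (s : List Char) : List (List Char) :=
  if h : PySem.List.len s > 4 then
    PySem.Chars.slice s (some (-4)) none :: splitGroupsB (PySem.Chars.slice s none (some (-4)))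
  else [s]
termination_by s.length
decreasing_by
  simp only [PySem.Chars.slice_eq_listSlice]
  rw [PySem.List.slice_to_neg_ofNat s 4 (by omega)]
  simp only [List.length_take]
  simp only [PySem.List.len_eq] at h
  omega

def lowertoupper_alt (number : Int) (recursive_depth : Int) : String :=
  String.ofList
    (((splitGroupsB (PySem.Int.toChars number)).foldl
        (fun (st : List Char × Int) g =>
          (chunkB g ++ PySem.List.pyGetD pvLarge st.2 [] ++ st.1, st.2 + 1))
        ([], recursive_depth)).1)

-- ===== PRECONDITION & SPEC =====
-- Pre_ excludes exactly the inputs where the Python A raises: negative numbers (int("-") is a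
-- ValueError) and depths whose large_unit index leaves [-4, 3] at some 4-digit group
-- (IndexError); A returns on everything else in Dom.
def Pre_lowertoupper (number : Int) (recursive_depth : Int) : Prop :=
  0 ≤ number ∧ -4 ≤ recursive_depth ∧
    recursive_depth + (if number ≤ 9999 then 0 else if number ≤ 99999999 then 1 else 2) ≤ 3
instance (number : Int) (recursive_depth : Int) : Decidable (Pre_lowertoupper number recursive_depth) := by
  unfold Pre_lowertoupper; infer_instance
def pvWitness_lowertoupper : Int × Int := (12345, 0)

def Spec_lowertoupper (number : Int) (recursive_depth : Int) (out : String) : Prop := out = lowertoupper_alt number recursive_depth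
instance (number : Int) (recursive_depth : Int) (out : String) : Decidable (Spec_lowertoupper number recursive_depth out) := by unfold Spec_lowertoupper; infer_instance

-- ===== CLAIM (what is proved, stated in full; the proofs are below) =====
def Claim_equal_lowertoupper : Prop := ∀ (number : Int) (recursive_depth : Int), Dom_lowertoupper number recursive_depth → Pre_lowertoupper number recursive_depth → Spec_lowertoupper number recursive_depth (lowertoupper number recursive_depth)

-- ===== LEMMAS AND PROOFS =====

-- digit characters
def pvD : List Char := ['0','1','2','3','4','5','6','7','8','9']

-- A's per-position token: bits[int(c)] (++ units[u] when c ≠ '0')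
def tokA (c : Char) (u : Int) : List Char :=
  PySem.List.pyGetD pvBits ((PySem.Int.ofChars? [c]).getD 0) []
    ++ (if c ≠ '0' then PySem.List.pyGetD pvUnits u [] else [])

-- A's raw loop output, linearised (u = units index of the head position)
def rawGo : List Char → Int → List Char
  | [], _ => []
  | c :: cs, u => tokA c u ++ rawGo cs (u - 1)

-- B's loop output, linearised (p = pending-zero flag)
def bGo : List Char → Int → Bool → List Char
  | [], _, _ => []
  | c :: cs, u, p =>
    let d := (PySem.Int.ofChars? [c]).getD 0
    if d = 0 then bGo cs (u - 1) true
    else ((if p then ['零'] else []) ++ [PySem.List.pyGetD pvBitsB d ' ']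
            ++ PySem.List.pyGetD pvUnits u []) ++ bGo cs (u - 1) false

-- collapse of adjacent 零零 (the fixpoint the while/replace loop computes)
def dedupZ : List Char → List Char
  | [] => []
  | c :: t => if c = '零' ∧ t.head? = some '零' then dedupZ t else c :: dedupZ t

-- one replace("零零", "零") pass, structurally
def replOne : List Char → List Char
  | [] => []
  | [c] => [c]
  | c :: d :: t => if c = '零' ∧ d = '零' then '零' :: replOne t else c :: replOne (d :: t)

-- trailing-zero trim
def stripZ (r : List Char) : List Char :=
  if r.getLast? = some '零' then r.dropLast else r

theorem replOne_length_le (r : List Char) : (replOne r).length ≤ r.length := by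
  induction r using replOne.induct with
  | case1 => simp [replOne]
  | case2 c => simp [replOne]
  | case3 c d t hcd ih =>
    obtain ⟨rfl, rfl⟩ := hcd
    simp only [replOne, if_pos (⟨rfl, rfl⟩ : '零' = '零' ∧ '零' = '零')]
    simp
    omega
  | case4 c d t hcd ih => simp only [replOne, if_neg hcd]; simpa using ih

theorem head?_replOne (r : List Char) : (replOne r).head? = r.head? := by
  induction r using replOne.induct with
  | case1 => rfl
  | case2 c => rfl
  | case3 c d t hcd ih =>
    obtain ⟨rfl, rfl⟩ := hcd
    simp [replOne]
  | case4 c d t hcd ih => simp [replOne, if_neg hcd]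

theorem dedupZ_ne_nil (r : List Char) (h : r ≠ []) : dedupZ r ≠ [] := by
  induction r with
  | nil => exact absurd rfl h
  | cons c t ih =>
    simp only [dedupZ]
    split_ifs with hc
    · rcases hc with ⟨rfl, hh⟩
      cases t with
      | nil => simp at hh
      | cons d t' => exact ih (by simp)
    · simp

theorem replace_go_eq (l : List Char) : ∀ (fuel : Nat) (acc : List Char), l.length ≤ fuel →
    PySem.Chars.replace.go ['零','零'] ['零'] fuel l acc = acc.reverse ++ replOne l := by
  intro fuel
  induction fuel generalizing l with
  | zero =>
    intro acc hl
    have : l = [] := List.eq_nil_of_length_eq_zero (by omega)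
    subst this
    simp [PySem.Chars.replace.go, replOne]
  | succ f ih =>
    intro acc hl
    cases l with
    | nil => simp [PySem.Chars.replace.go, replOne]
    | cons c t =>
      cases t with
      | nil =>
        have hpre : (['零','零'] : List Char).isPrefixOf [c] = false := by
          rw [Bool.eq_false_iff]
          intro hp
          rw [List.isPrefixOf_iff_prefix] at hp
          have := hp.length_le
          simp at this
        simp only [PySem.Chars.replace.go, hpre, Bool.false_eq_true, if_false]
        rw [ih [] (c :: acc) (by simp)]
        simp [replOne]
      | cons d t' =>
        by_cases hzz : c = '零' ∧ d = '零'
        · rcases hzz with ⟨rfl, rfl⟩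
          have hpre : (['零','零'] : List Char).isPrefixOf ('零'::'零'::t') = true := by
            rw [List.isPrefixOf_iff_prefix]
            exact ⟨t', rfl⟩
          simp only [PySem.Chars.replace.go, hpre, if_pos]
          rw [show List.drop (['零','零'] : List Char).length ('零'::'零'::t') = t' from rfl]
          rw [show (['零'] : List Char).reverse ++ acc = '零' :: acc from rfl]
          rw [ih t' ('零' :: acc) (by simp at hl ⊢; omega)]
          simp [replOne]
        · have hpre : (['零','零'] : List Char).isPrefixOf (c::d::t') = false := by
            rw [Bool.eq_false_iff]
            intro hp
            rw [List.isPrefixOf_iff_prefix] at hp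
            rcases hp with ⟨u, hu⟩
            simp only [List.cons_append, List.nil_append, List.cons.injEq] at hu
            exact hzz ⟨hu.1.symm, hu.2.1.symm⟩
          simp only [PySem.Chars.replace.go, hpre, Bool.false_eq_true, if_false]
          rw [ih (d :: t') (c :: acc) (by simp at hl ⊢; omega)]
          simp [replOne, if_neg hzz]

theorem replace_eq (r : List Char) : PySem.Chars.replace r ['零','零'] ['零'] = replOne r := by
  have : (['零','零'] : List Char).isEmpty = false := rfl
  simp only [PySem.Chars.replace, this, Bool.false_eq_true, if_false]
  simpa using replace_go_eq r r.length [] le_rfl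

theorem replOne_length (r : List Char) (h : ['零','零'] <:+: r) : (replOne r).length < r.length := by
  induction r using replOne.induct with
  | case1 => simp at h
  | case2 c =>
    exfalso
    have := h.length_le
    simp at this
  | case3 c d t hcd ih =>
    obtain ⟨rfl, rfl⟩ := hcd
    simp only [replOne, if_pos (⟨rfl, rfl⟩ : '零' = '零' ∧ '零' = '零')]
    have := replOne_length_le t
    simp
    omega
  | case4 c d t hcd ih =>
    simp only [replOne, if_neg hcd]
    have htl : (['零','零'] : List Char) <:+: d :: t := by
      rcases List.infix_cons_iff.mp h with hp | hi
      · exfalso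
        rcases hp with ⟨u, hu⟩
        simp only [List.cons_append, List.nil_append, List.cons.injEq] at hu
        exact hcd ⟨hu.1.symm, hu.2.1.symm⟩
      · exact hi
    have := ih htl
    simp at this ⊢
    omega

theorem dedupZ_replOne (r : List Char) :
    dedupZ (replOne r) = dedupZ r ∧ dedupZ ('零' :: replOne r) = dedupZ ('零' :: r) := by
  induction r using replOne.induct with
  | case1 => exact ⟨rfl, rfl⟩
  | case2 c => exact ⟨rfl, rfl⟩
  | case3 c d t hcd ih =>
    obtain ⟨rfl, rfl⟩ := hcd
    constructor
    · show dedupZ ('零' :: replOne t) = dedupZ ('零'::'零'::t)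
      rw [ih.2]
      simp [dedupZ]
    · show dedupZ ('零'::'零' :: replOne t) = dedupZ ('零'::'零'::'零'::t)
      have h1 : dedupZ ('零'::'零' :: replOne t) = dedupZ ('零' :: replOne t) := by
        simp [dedupZ]
      rw [h1, ih.2]
      simp [dedupZ]
  | case4 c d t hcd ih =>
    have hd : (replOne (d :: t)).head? = some d := by rw [head?_replOne]; rfl
    have hrepl : replOne (c :: d :: t) = c :: replOne (d :: t) := by
      simp [replOne, if_neg hcd]
    have hcond1 : ¬(c = '零' ∧ (replOne (d :: t)).head? = some '零') := by
      rw [hd]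
      simpa using hcd
    have hcond2 : ¬(c = '零' ∧ (d :: t).head? = some '零') := by
      simpa using hcd
    have hP : dedupZ (c :: replOne (d :: t)) = dedupZ (c :: d :: t) := by
      simp only [dedupZ]
      rw [if_neg hcond1, if_neg hcond2, ih.1]
      rfl
    rw [hrepl]
    refine ⟨hP, ?_⟩
    by_cases hc : c = '零'
    · subst hc
      have hl : dedupZ ('零' :: '零' :: replOne (d :: t)) = dedupZ ('零' :: replOne (d :: t)) := by
        simp [dedupZ]
      have hr : dedupZ ('零' :: '零' :: d :: t) = dedupZ ('零' :: d :: t) := by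
        simp [dedupZ]
      rw [hl, hr, hP]
    · have hl : dedupZ ('零' :: c :: replOne (d :: t)) = '零' :: dedupZ (c :: replOne (d :: t)) := by
        simp only [dedupZ, List.head?_cons]
        rw [if_neg (by simp [hc])]
      have hr : dedupZ ('零' :: c :: d :: t) = '零' :: dedupZ (c :: d :: t) := by
        simp only [dedupZ, List.head?_cons]
        rw [if_neg (by simp [hc])]
      rw [hl, hr, hP]

theorem dedupZ_of_not_infix (r : List Char) (h : ¬ ['零','零'] <:+: r) : dedupZ r = r := by
  induction r with
  | nil => rfl
  | cons c t ih =>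
    simp only [dedupZ]
    split_ifs with hc
    · rcases hc with ⟨rfl, hh⟩
      cases t with
      | nil => simp at hh
      | cons d t' =>
        simp only [List.head?_cons, Option.some.injEq] at hh
        subst hh
        exact absurd (List.IsPrefix.isInfix ⟨t', rfl⟩) h
    · rw [ih (fun hi => h (List.infix_cons hi))]

theorem pvCollapse_eq_dedupZ (f : Nat) : ∀ r : List Char, r.length ≤ f → pvCollapse f r = dedupZ r := by
  induction f with
  | zero =>
    intro r hr
    have : r = [] := List.eq_nil_of_length_eq_zero (by omega)
    subst this
    rfl
  | succ f ih =>
    intro r hr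
    simp only [pvCollapse]
    split_ifs with hin
    · have hinf : (['零','零'] : List Char) <:+: r := (PySem.Chars.isIn_iff_infix _ _).mp hin
      rw [replace_eq]
      rw [ih _ (by have := replOne_length r hinf; omega)]
      exact (dedupZ_replOne r).1
    · have hninf : ¬ (['零','零'] : List Char) <:+: r := by
        intro hinf
        exact hin ((PySem.Chars.isIn_iff_infix _ _).mpr hinf)
      exact (dedupZ_of_not_infix r hninf).symm

theorem mem_dedupZ (r : List Char) : ∀ c ∈ dedupZ r, c ∈ r := by
  induction r with
  | nil => simp [dedupZ]
  | cons c t ih =>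
    intro x hx
    simp only [dedupZ] at hx
    split_ifs at hx with hc
    · exact List.mem_cons_of_mem c (ih x hx)
    · rcases List.mem_cons.mp hx with rfl | hx'
      · exact List.mem_cons_self
      · exact List.mem_cons_of_mem c (ih x hx')

-- distribution of dedupZ over a z-free prefix
theorem dedupZ_append_free (t r : List Char) (h : ∀ c ∈ t, c ≠ '零') :
    dedupZ (t ++ r) = t ++ dedupZ r := by
  induction t with
  | nil => simp
  | cons c t ih =>
    have hc : c ≠ '零' := h c List.mem_cons_self
    simp only [List.cons_append, dedupZ]
    rw [if_neg (by simp [hc]), ih (fun x hx => h x (List.mem_cons_of_mem c hx))]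

theorem stripZ_append_free (t r : List Char) (h : ∀ c ∈ t, c ≠ '零') :
    stripZ (t ++ r) = t ++ stripZ r := by
  cases hr : r with
  | nil =>
    simp only [List.append_nil]
    have h1 : stripZ ([] : List Char) = [] := by simp [stripZ]
    rw [h1, List.append_nil]
    unfold stripZ
    split_ifs with hl
    · exfalso
      have hmem : '零' ∈ t := List.mem_of_getLast? hl
      exact h '零' hmem rfl
    · rfl
  | cons x xs =>
    unfold stripZ
    rw [List.getLast?_append_of_ne_nil t (by simp)]
    split_ifs with hl
    · rw [List.dropLast_append_of_ne_nil (by simp)]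
    · rfl

theorem stripZ_cons_z (r : List Char) (h : r ≠ []) : stripZ ('零' :: r) = '零' :: stripZ r := by
  unfold stripZ
  rw [show ('零' :: r : List Char) = ['零'] ++ r from rfl,
    List.getLast?_append_of_ne_nil _ h]
  split_ifs with hl
  · rw [List.dropLast_append_of_ne_nil h]
    rfl
  · rfl

-- facts about the tokens, for digit characters (closed, by decide)
theorem tokA_zero (u : Int) : tokA '0' u = ['零'] := by
  simp only [tokA, ne_eq, not_true_eq_false, if_false, List.append_nil]
  decide

theorem mem_unit (u : Int) : ∀ c ∈ PySem.List.pyGetD pvUnits u [], c ∈ ['拾','佰','仟'] := by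
  intro c hc
  rcases h : PySem.List.pyGet? pvUnits u with _ | v
  · simp [PySem.List.pyGetD, h] at hc
  · have hv := PySem.List.mem_of_pyGet?_eq_some (xs := pvUnits) (i := u) h
    simp [PySem.List.pyGetD, h] at hc
    simp [pvUnits] at hv
    rcases hv with rfl | rfl | rfl | rfl <;> simp_all

theorem dA_ne_zero {c : Char} (hc : c ∈ pvD) (h0 : c ≠ '0') : (PySem.Int.ofChars? [c]).getD 0 ≠ 0 := by
  simp [pvD] at hc
  rcases hc with rfl|rfl|rfl|rfl|rfl|rfl|rfl|rfl|rfl|rfl <;> first | exact absurd rfl h0 | decide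

theorem bits_single {c : Char} (hc : c ∈ pvD) (h0 : c ≠ '0') :
    PySem.List.pyGetD pvBits ((PySem.Int.ofChars? [c]).getD 0) []
      = [PySem.List.pyGetD pvBitsB ((PySem.Int.ofChars? [c]).getD 0) ' '] := by
  simp [pvD] at hc
  rcases hc with rfl|rfl|rfl|rfl|rfl|rfl|rfl|rfl|rfl|rfl <;> first | exact absurd rfl h0 | decide

theorem bit_ne_z {c : Char} (hc : c ∈ pvD) (h0 : c ≠ '0') :
    PySem.List.pyGetD pvBitsB ((PySem.Int.ofChars? [c]).getD 0) ' ' ∈ ['壹','贰','叁','肆','伍','陆','柒','捌','玖'] := by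
  simp [pvD] at hc
  rcases hc with rfl|rfl|rfl|rfl|rfl|rfl|rfl|rfl|rfl|rfl <;> first | exact absurd rfl h0 | decide

theorem nz_ne_z {x : Char} (h : x ∈ (['壹','贰','叁','肆','伍','陆','柒','捌','玖'] : List Char)) : x ≠ '零' := by
  intro hx
  subst hx
  revert h
  decide

theorem un_ne_z {x : Char} (h : x ∈ (['拾','佰','仟'] : List Char)) : x ≠ '零' := by
  intro hx
  subst hx
  revert h
  decide

theorem nz_mem_big {x : Char} (h : x ∈ (['壹','贰','叁','肆','伍','陆','柒','捌','玖'] : List Char)) :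
    x ∈ (['零','壹','贰','叁','肆','伍','陆','柒','捌','玖','拾','佰','仟'] : List Char) := by
  simp only [List.mem_cons, List.not_mem_nil, or_false] at h ⊢
  tauto

theorem un_mem_big {x : Char} (h : x ∈ (['拾','佰','仟'] : List Char)) :
    x ∈ (['零','壹','贰','叁','肆','伍','陆','柒','捌','玖','拾','佰','仟'] : List Char) := by
  simp only [List.mem_cons, List.not_mem_nil, or_false] at h ⊢
  tauto

theorem tokA_nonzero {c : Char} (hc : c ∈ pvD) (h0 : c ≠ '0') (u : Int) :
    tokA c u = [PySem.List.pyGetD pvBitsB ((PySem.Int.ofChars? [c]).getD 0) ' ']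
      ++ PySem.List.pyGetD pvUnits u [] := by
  unfold tokA
  rw [bits_single hc h0, if_pos h0]

theorem tokA_nonzero_free {c : Char} (hc : c ∈ pvD) (h0 : c ≠ '0') (u : Int) :
    ∀ x ∈ tokA c u, x ≠ '零' := by
  intro x hx
  rw [tokA_nonzero hc h0] at hx
  rcases List.mem_append.mp hx with hx | hx
  · rw [List.mem_singleton.mp hx]
    exact nz_ne_z (bit_ne_z hc h0)
  · exact un_ne_z (mem_unit u x hx)

theorem rawGo_ne_nil (g : List Char) (hg : ∀ c ∈ g, c ∈ pvD) (hne : g ≠ []) (u : Int) :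
    rawGo g u ≠ [] := by
  cases g with
  | nil => exact absurd rfl hne
  | cons c cs =>
    show tokA c u ++ rawGo cs (u - 1) ≠ []
    by_cases h0 : c = '0'
    · subst h0
      rw [tokA_zero]
      simp
    · rw [tokA_nonzero (hg c List.mem_cons_self) h0]
      simp

theorem head?_rawGo_zero (cs : List Char) (u : Int) :
    (rawGo ('0' :: cs) u).head? = some '零' := by
  show (tokA '0' u ++ rawGo cs (u - 1)).head? = some '零'
  rw [tokA_zero]
  rfl

theorem head?_rawGo_nonzero {c : Char} (hc : c ∈ pvD) (h0 : c ≠ '0') (cs : List Char) (u : Int) :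
    (rawGo (c :: cs) u).head? = some (PySem.List.pyGetD pvBitsB ((PySem.Int.ofChars? [c]).getD 0) ' ') := by
  show (tokA c u ++ rawGo cs (u - 1)).head? = _
  rw [tokA_nonzero hc h0]
  rfl

-- every character A's raw loop can emit
theorem mem_rawGo (g : List Char) (hg : ∀ c ∈ g, c ∈ pvD) : ∀ u, ∀ c ∈ rawGo g u,
    c ∈ ['零','壹','贰','叁','肆','伍','陆','柒','捌','玖','拾','佰','仟'] := by
  revert hg
  induction g with
  | nil => intro hg u c hc; simp [rawGo] at hc
  | cons c cs ih =>
    intro hg u x hx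
    rcases List.mem_append.mp hx with hx | hx
    · by_cases h0 : c = '0'
      · subst h0
        rw [tokA_zero] at hx
        rw [List.mem_singleton.mp hx]
        decide
      · have hcd := hg c List.mem_cons_self
        rw [tokA_nonzero hcd h0] at hx
        rcases List.mem_append.mp hx with hx | hx
        · rw [List.mem_singleton.mp hx]
          exact nz_mem_big (bit_ne_z hcd h0)
        · exact un_mem_big (mem_unit u x hx)
    · exact ih (fun a ha => hg a (List.mem_cons_of_mem c ha)) (u - 1) x hx

theorem foldA_go (g : List Char) : ∀ (suf pre acc : List Char), g = pre ++ suf →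
    (PySem.List.pyRange pre.length (PySem.List.len g) 1).foldl (fun res i =>
      let c := PySem.List.pyGetD g i ' '
      let res := res ++ PySem.List.pyGetD pvBits ((PySem.Int.ofChars? [c]).getD 0) []
      if c ≠ '0' then res ++ PySem.List.pyGetD pvUnits (PySem.List.len g - i - 1) [] else res) acc
        = acc ++ rawGo suf (PySem.List.len g - pre.length - 1) := by
  intro suf
  induction suf with
  | nil =>
    intro pre acc hg
    rw [PySem.List.pyRange_one_eq_nil (by simp [PySem.List.len_eq, hg])]
    simp [rawGo]
  | cons c cs ih =>
    intro pre acc hg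
    have hlen : (pre.length : Int) < PySem.List.len g := by
      simp only [PySem.List.len_eq, hg, List.length_append, List.length_cons]
      omega
    rw [PySem.List.pyRange_one_cons hlen]
    rw [List.foldl_cons]
    have hc : PySem.List.pyGetD g (pre.length : Int) ' ' = c := by
      rw [PySem.List.pyGetD_natCast, hg, List.getD_eq_getElem?_getD,
        List.getElem?_append_right (le_refl pre.length)]
      simp
    have hbody : (let c0 := PySem.List.pyGetD g ((pre.length : Nat) : Int) ' '
        let res := acc ++ PySem.List.pyGetD pvBits ((PySem.Int.ofChars? [c0]).getD 0) []
        if c0 ≠ '0' then res ++ PySem.List.pyGetD pvUnits (PySem.List.len g - ((pre.length : Nat) : Int) - 1) [] else res)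
        = acc ++ tokA c (PySem.List.len g - pre.length - 1) := by
      simp only [hc, tokA]
      split_ifs with h0 <;> simp
    rw [hbody]
    have hpre' : g = (pre ++ [c]) ++ cs := by simp [hg]
    have := ih (pre ++ [c]) (acc ++ tokA c (PySem.List.len g - pre.length - 1)) hpre'
    rw [show ((pre.length : Int) + 1) = ((pre ++ [c]).length : Int) by simp] at *
    rw [this, rawGo]
    have harith : PySem.List.len g - ((pre ++ [c]).length : Int) - 1
        = PySem.List.len g - pre.length - 1 - 1 := by
      simp only [List.length_append, List.length_cons, List.length_nil]
      push_cast
      ring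
    rw [harith, List.append_assoc]

-- A's loop equals rawGo
theorem foldA_eq (g : List Char) : (PySem.List.pyRange 0 (PySem.List.len g) 1).foldl (fun res i =>
    let c := PySem.List.pyGetD g i ' '
    let res := res ++ PySem.List.pyGetD pvBits ((PySem.Int.ofChars? [c]).getD 0) []
    if c ≠ '0' then res ++ PySem.List.pyGetD pvUnits (PySem.List.len g - i - 1) [] else res) []
      = rawGo g (PySem.List.len g - 1) := by
  have := foldA_go g g [] [] rfl
  simpa using this

theorem foldB_go (g : List Char) : ∀ (suf pre : List Char) (acc : List Char) (p : Bool), g = pre ++ suf →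
    ((PySem.List.pyRange pre.length (PySem.List.len g) 1).foldl (fun (st : List Char × Bool) i =>
      let d := (PySem.Int.ofChars? [PySem.List.pyGetD g i ' ']).getD 0
      if d = 0 then (st.1, true)
      else (st.1 ++ ((if st.2 then ['零'] else []) ++ [PySem.List.pyGetD pvBitsB d ' ']
              ++ PySem.List.pyGetD pvUnits (PySem.List.len g - i - 1) []), false)) (acc, p)).1
        = acc ++ bGo suf (PySem.List.len g - pre.length - 1) p := by
  intro suf
  induction suf with
  | nil =>
    intro pre acc p hg
    rw [PySem.List.pyRange_one_eq_nil (by simp [PySem.List.len_eq, hg])]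
    simp [bGo]
  | cons c cs ih =>
    intro pre acc p hg
    have hlen : (pre.length : Int) < PySem.List.len g := by
      simp only [PySem.List.len_eq, hg, List.length_append, List.length_cons]
      omega
    rw [PySem.List.pyRange_one_cons hlen]
    rw [List.foldl_cons]
    have hc : PySem.List.pyGetD g (pre.length : Int) ' ' = c := by
      rw [PySem.List.pyGetD_natCast, hg, List.getD_eq_getElem?_getD,
        List.getElem?_append_right (le_refl pre.length)]
      simp
    have hpre' : g = (pre ++ [c]) ++ cs := by simp [hg]
    have harith : PySem.List.len g - ((pre ++ [c]).length : Int) - 1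
        = PySem.List.len g - pre.length - 1 - 1 := by
      simp only [List.length_append, List.length_cons, List.length_nil]
      push_cast
      ring
    by_cases hd : (PySem.Int.ofChars? [c]).getD 0 = 0
    · have hbody : (let d := (PySem.Int.ofChars? [PySem.List.pyGetD g ((pre.length : Nat) : Int) ' ']).getD 0
          if d = 0 then ((acc, p).1, true)
          else ((acc, p).1 ++ ((if (acc, p).2 then ['零'] else []) ++ [PySem.List.pyGetD pvBitsB d ' ']
                  ++ PySem.List.pyGetD pvUnits (PySem.List.len g - ((pre.length : Nat) : Int) - 1) []), false))
          = ((acc : List Char), true) := by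
        simp only [hc, hd, if_pos]
      rw [hbody]
      have := ih (pre ++ [c]) acc true hpre'
      rw [show ((pre.length : Int) + 1) = ((pre ++ [c]).length : Int) by simp] at *
      rw [this, harith]
      show acc ++ bGo cs _ true = acc ++ bGo (c :: cs) _ p
      rw [show bGo (c :: cs) (PySem.List.len g - ↑pre.length - 1) p
            = bGo cs (PySem.List.len g - ↑pre.length - 1 - 1) true from by
        simp only [bGo, hd, if_pos]]
    · have hbody : (let d := (PySem.Int.ofChars? [PySem.List.pyGetD g ((pre.length : Nat) : Int) ' ']).getD 0
          if d = 0 then ((acc, p).1, true)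
          else ((acc, p).1 ++ ((if (acc, p).2 then ['零'] else []) ++ [PySem.List.pyGetD pvBitsB d ' ']
                  ++ PySem.List.pyGetD pvUnits (PySem.List.len g - ((pre.length : Nat) : Int) - 1) []), false))
          = ((acc ++ ((if p then ['零'] else []) ++ [PySem.List.pyGetD pvBitsB ((PySem.Int.ofChars? [c]).getD 0) ' ']
              ++ PySem.List.pyGetD pvUnits (PySem.List.len g - pre.length - 1) []) : List Char), false) := by
        simp only [hc, hd, if_neg, if_false]
      rw [hbody]
      have := ih (pre ++ [c])
        (acc ++ ((if p then ['零'] else []) ++ [PySem.List.pyGetD pvBitsB ((PySem.Int.ofChars? [c]).getD 0) ' ']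
          ++ PySem.List.pyGetD pvUnits (PySem.List.len g - pre.length - 1) [])) false hpre'
      rw [show ((pre.length : Int) + 1) = ((pre ++ [c]).length : Int) by simp] at *
      rw [this, harith]
      rw [show bGo (c :: cs) (PySem.List.len g - ↑pre.length - 1) p
            = ((if p then ['零'] else []) ++ [PySem.List.pyGetD pvBitsB ((PySem.Int.ofChars? [c]).getD 0) ' ']
                ++ PySem.List.pyGetD pvUnits (PySem.List.len g - ↑pre.length - 1) [])
              ++ bGo cs (PySem.List.len g - ↑pre.length - 1 - 1) false from by
        simp only [bGo, hd, if_neg, if_false]]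
      rw [List.append_assoc]

-- B's loop equals bGo
theorem foldB_eq (g : List Char) : chunkB g = bGo g (PySem.List.len g - 1) false := by
  unfold chunkB
  have := foldB_go g g [] [] false rfl
  simpa using this

theorem bGo_cons_true (c : Char) (cs : List Char) (u : Int)
    (hd : (PySem.Int.ofChars? [c]).getD 0 ≠ 0) :
    bGo (c :: cs) u true = '零' :: bGo (c :: cs) u false := by
  rw [show bGo (c :: cs) u true
      = (['零'] ++ [PySem.List.pyGetD pvBitsB ((PySem.Int.ofChars? [c]).getD 0) ' ']
          ++ PySem.List.pyGetD pvUnits u []) ++ bGo cs (u - 1) false from by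
        simp only [bGo, hd, if_neg, if_false, if_pos],
    show bGo (c :: cs) u false
      = ([] ++ [PySem.List.pyGetD pvBitsB ((PySem.Int.ofChars? [c]).getD 0) ' ']
          ++ PySem.List.pyGetD pvUnits u []) ++ bGo cs (u - 1) false from by
        simp only [bGo, hd, if_neg, if_false, Bool.false_eq_true]]
  simp

-- the heart: trim(collapse(raw)) is B's one pass
theorem chunk_core (g : List Char) (hg : ∀ c ∈ g, c ∈ pvD) : ∀ u,
    stripZ (dedupZ (rawGo g u)) = bGo g u false := by
  revert hg
  induction g with
  | nil =>
    intro hg u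
    show stripZ (dedupZ []) = bGo [] u false
    simp [dedupZ, bGo, stripZ]
  | cons c cs ih =>
    intro hg u
    have hcd := hg c List.mem_cons_self
    have hcs : ∀ a ∈ cs, a ∈ pvD := fun a ha => hg a (List.mem_cons_of_mem c ha)
    by_cases h0 : c = '0'
    · subst h0
      have hd0 : (PySem.Int.ofChars? [('0' : Char)]).getD 0 = 0 := by decide
      have hbg : bGo ('0' :: cs) u false = bGo cs (u - 1) true := by
        simp [bGo, hd0]
      rw [hbg]
      cases cs with
      | nil =>
        show stripZ (dedupZ (tokA '0' u ++ rawGo [] (u - 1))) = bGo [] (u - 1) true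
        rw [tokA_zero]
        show stripZ (dedupZ ['零']) = bGo [] (u - 1) true
        simp [dedupZ, stripZ, bGo]
      | cons d cs' =>
        have hdd := hcs d List.mem_cons_self
        by_cases hd : d = '0'
        · subst hd
          have h1 : rawGo ('0' :: '0' :: cs') u = '零' :: rawGo ('0' :: cs') (u - 1) := by
            show tokA '0' u ++ rawGo ('0' :: cs') (u - 1) = _
            rw [tokA_zero]
            rfl
          have h2 : dedupZ ('零' :: rawGo ('0' :: cs') (u - 1)) = dedupZ (rawGo ('0' :: cs') (u - 1)) := by
            rw [show dedupZ ('零' :: rawGo ('0' :: cs') (u - 1))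
                = if '零' = '零' ∧ (rawGo ('0' :: cs') (u - 1)).head? = some '零'
                  then dedupZ (rawGo ('0' :: cs') (u - 1))
                  else '零' :: dedupZ (rawGo ('0' :: cs') (u - 1)) from rfl]
            rw [if_pos ⟨rfl, head?_rawGo_zero cs' (u - 1)⟩]
          rw [h1, h2, ih hcs (u - 1)]
          have hbg2 : bGo ('0' :: cs') (u - 1) false = bGo cs' (u - 1 - 1) true := by
            simp [bGo, hd0]
          have hbg3 : bGo ('0' :: cs') (u - 1) true = bGo cs' (u - 1 - 1) true := by
            simp [bGo, hd0]
          rw [hbg2, hbg3]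
        · have hdnz : (PySem.Int.ofChars? [d]).getD 0 ≠ 0 :=
            dA_ne_zero hdd hd
          have h1 : rawGo ('0' :: d :: cs') u = '零' :: rawGo (d :: cs') (u - 1) := by
            show tokA '0' u ++ rawGo (d :: cs') (u - 1) = _
            rw [tokA_zero]
            rfl
          have h2 : dedupZ ('零' :: rawGo (d :: cs') (u - 1)) = '零' :: dedupZ (rawGo (d :: cs') (u - 1)) := by
            rw [show dedupZ ('零' :: rawGo (d :: cs') (u - 1))
                = if '零' = '零' ∧ (rawGo (d :: cs') (u - 1)).head? = some '零'
                  then dedupZ (rawGo (d :: cs') (u - 1))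
                  else '零' :: dedupZ (rawGo (d :: cs') (u - 1)) from rfl]
            rw [head?_rawGo_nonzero hdd hd cs' (u - 1), if_neg]
            intro hcontra
            exact nz_ne_z (bit_ne_z hdd hd) (Option.some.inj hcontra.2)
          rw [h1, h2]
          rw [stripZ_cons_z _ (dedupZ_ne_nil _ (rawGo_ne_nil (d :: cs') (fun a ha => hcs a ha) (by simp) (u - 1)))]
          rw [ih hcs (u - 1)]
          rw [bGo_cons_true d cs' (u - 1) hdnz]
    · have hdnz : (PySem.Int.ofChars? [c]).getD 0 ≠ 0 := dA_ne_zero hcd h0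
      have h1 : rawGo (c :: cs) u = tokA c u ++ rawGo cs (u - 1) := rfl
      rw [h1, dedupZ_append_free _ _ (tokA_nonzero_free hcd h0 u),
        stripZ_append_free _ _ (tokA_nonzero_free hcd h0 u), ih hcs (u - 1)]
      rw [tokA_nonzero hcd h0]
      rw [show bGo (c :: cs) u false
          = ([] ++ [PySem.List.pyGetD pvBitsB ((PySem.Int.ofChars? [c]).getD 0) ' ']
              ++ PySem.List.pyGetD pvUnits u []) ++ bGo cs (u - 1) false from by
        simp only [bGo, hdnz, if_neg, if_false, Bool.false_eq_true]]
      simp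

theorem trim_eq_stripZ (X : List Char) :
    (if PySem.List.pyGetD X (-1) ' ' = '零' then PySem.Chars.slice X none (some (-1)) else X)
      = stripZ X := by
  unfold stripZ
  have h1 : PySem.List.pyGetD X (-1) ' ' = X.getLast?.getD ' ' := by
    simp [PySem.List.pyGetD, PySem.List.pyGet?_neg_one]
  rw [h1]
  simp only [PySem.Chars.slice_eq_listSlice, PySem.List.slice_to_neg_one]
  cases hX : X.getLast? with
  | none => simp
  | some a => by_cases ha : a = '零' <;> simp [ha]

theorem mem_stripZ (X : List Char) : ∀ x ∈ stripZ X, x ∈ X := by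
  unfold stripZ
  split_ifs with h
  · exact fun x hx => List.dropLast_subset _ hx
  · exact fun x hx => hx

theorem chunk_eq (g : List Char) (hg : ∀ c ∈ g, c ∈ pvD) : chunkA g = chunkB g := by
  have hA : chunkA g = stripZ (dedupZ (rawGo g (PySem.List.len g - 1))) := by
    simp only [chunkA]
    rw [foldA_eq, pvCollapse_eq_dedupZ _ _ le_rfl, trim_eq_stripZ]
    rw [if_neg]
    intro hcontra
    rw [show PySem.Chars.slice (stripZ (dedupZ (rawGo g (PySem.List.len g - 1)))) none (some 2)
        = (stripZ (dedupZ (rawGo g (PySem.List.len g - 1)))).take (2 : Int).toNat from by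
      simp only [PySem.Chars.slice_eq_listSlice]
      exact PySem.List.slice_to _ (by norm_num)] at hcontra
    have hmem : ('一' : Char) ∈ (stripZ (dedupZ (rawGo g (PySem.List.len g - 1)))).take (2 : Int).toNat := by
      rw [hcontra]
      simp
    have hmem2 := List.take_subset _ _ hmem
    have hmem3 := mem_dedupZ _ _ (mem_stripZ _ _ hmem2)
    have hmem4 := mem_rawGo g hg _ _ hmem3
    revert hmem4
    decide
  rw [hA, foldB_eq g, chunk_core g hg (PySem.List.len g - 1)]

-- str(n) is made of digit characters when 0 ≤ n
theorem toChars_digits (n : Int) (hn : 0 ≤ n) : ∀ c ∈ PySem.Int.toChars n, c ∈ pvD := by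
  have hdc : ∀ k, k < 10 → Nat.digitChar k ∈ pvD := by
    have h : ∀ k ∈ List.range 10, Nat.digitChar k ∈ pvD := by decide
    intro k hk
    exact h k (List.mem_range.mpr hk)
  have hcore : ∀ (f m : Nat) (acc : List Char), (∀ c ∈ acc, c ∈ pvD) →
      ∀ c ∈ Nat.toDigitsCore 10 f m acc, c ∈ pvD := by
    intro f
    induction f with
    | zero => intro m acc hacc c hc; exact hacc c hc
    | succ f ih =>
      intro m acc hacc c hc
      rw [show Nat.toDigitsCore 10 (f + 1) m acc
          = if m / 10 = 0 then (m % 10).digitChar :: acc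
            else Nat.toDigitsCore 10 f (m / 10) ((m % 10).digitChar :: acc) from rfl] at hc
      have hd : (m % 10).digitChar ∈ pvD := hdc _ (Nat.mod_lt _ (by norm_num))
      split_ifs at hc with h10
      · rcases List.mem_cons.mp hc with rfl | hc'
        · exact hd
        · exact hacc c hc'
      · exact ih (m / 10) ((m % 10).digitChar :: acc)
          (fun a ha => (List.mem_cons.mp ha).elim (fun he => he ▸ hd) (hacc a)) c hc
  intro c hc
  rw [show PySem.Int.toChars n = Nat.toDigits 10 n.toNat from by
    unfold PySem.Int.toChars
    rw [if_neg (by omega)]] at hc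
  exact hcore (n.toNat + 1) n.toNat [] (by simp) c hc

-- B's outer fold: the accumulator is a suffix
theorem foldB_acc (gs : List (List Char)) : ∀ (acc : List Char) (d : Int),
    ((gs.foldl (fun (st : List Char × Int) g =>
        (chunkB g ++ PySem.List.pyGetD pvLarge st.2 [] ++ st.1, st.2 + 1)) (acc, d)).1)
      = ((gs.foldl (fun (st : List Char × Int) g =>
        (chunkB g ++ PySem.List.pyGetD pvLarge st.2 [] ++ st.1, st.2 + 1)) ([], d)).1) ++ acc := by
  induction gs with
  | nil => intro acc d; simp
  | cons g gs ih =>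
    intro acc d
    simp only [List.foldl_cons]
    rw [ih (chunkB g ++ PySem.List.pyGetD pvLarge d [] ++ acc) (d + 1),
      ih (chunkB g ++ PySem.List.pyGetD pvLarge d [] ++ []) (d + 1)]
    simp

theorem aux_eq_all : ∀ (s : List Char) (r : Int), (∀ c ∈ s, c ∈ pvD) →
    lowertoupperAux s r = ((splitGroupsB s).foldl (fun (st : List Char × Int) g =>
      (chunkB g ++ PySem.List.pyGetD pvLarge st.2 [] ++ st.1, st.2 + 1)) ([], r)).1 := by
  intro s r
  induction s, r using lowertoupperAux.induct with
  | case1 s r h ih =>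
    intro hs
    have hsub : ∀ c ∈ PySem.Chars.slice s none (some (-4)), c ∈ pvD := by
      intro c hc
      simp only [PySem.Chars.slice_eq_listSlice] at hc
      exact hs c (PySem.List.mem_of_mem_slice s _ _ hc)
    have hsub4 : ∀ c ∈ PySem.Chars.slice s (some (-4)) none, c ∈ pvD := by
      intro c hc
      simp only [PySem.Chars.slice_eq_listSlice] at hc
      exact hs c (PySem.List.mem_of_mem_slice s _ _ hc)
    rw [lowertoupperAux, splitGroupsB]
    rw [dif_pos h, dif_pos h, if_pos h]
    rw [List.foldl_cons, foldB_acc]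
    rw [ih hsub]
    rw [chunk_eq _ hsub4]
    simp [List.append_assoc]
  | case2 s r h =>
    intro hs
    rw [lowertoupperAux, splitGroupsB]
    rw [dif_neg h, dif_neg h, if_neg h]
    rw [List.foldl_cons, List.foldl_nil]
    rw [chunk_eq _ hs]
    simp

theorem aux_eq (s : List Char) (hs : ∀ c ∈ s, c ∈ pvD) : ∀ r : Int,
    lowertoupperAux s r = ((splitGroupsB s).foldl (fun (st : List Char × Int) g =>
      (chunkB g ++ PySem.List.pyGetD pvLarge st.2 [] ++ st.1, st.2 + 1)) ([], r)).1 := by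
  intro r
  exact aux_eq_all s r hs

-- ===== VERDICT (by name: the statement is the Claim_ definition above) =====
theorem lowertoupper_spec : Claim_equal_lowertoupper := by
  intro number recursive_depth _ hpre
  unfold Spec_lowertoupper lowertoupper lowertoupper_alt
  exact congrArg String.ofList (aux_eq _ (toChars_digits number hpre.1) recursive_depth)
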